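-- pv_equiv track=rewrite | github.com/bsdphk/PyReveng3 | pyreveng/arch/rc3600/relfile.py | b40
-- ===== SOURCE A (Python) =====
-- def b40(x):
--     ''' See RCSL-42-I-833 appendix D '''
--     t = ""
--     c = "_0123456789ABCDEFGHIJKLMNOPQRSTUVWXYZ.?/"
--     for i in (x[1] >> 5, x[0]):
--         while i:
--             t += c[i % 40]
--             i //= 40
--     return '"' + t[::-1] + '"'
-- ===== SOURCE B (Python) =====
-- def b40(x):
--     c = "_0123456789ABCDEFGHIJKLMNOPQRSTUVWXYZ.?/"
--     def conv(i):
--         # fixed-width base-40 extraction (6 digits cover any 32-bit value),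
--         # then strip the leading zero digits
--         digits = [i // 40 ** k % 40 for k in range(5, -1, -1)]
--         while digits and digits[0] == 0:
--             digits = digits[1:]
--         return ''.join(c[d] for d in digits)
--     return '"' + conv(x[0]) + conv(x[1] >> 5) + '"'
-- ===== Notes on version B (the rewrite author's own statement) =====
-- stated objective: alternative
-- what changed: Replaces A's accumulating while-loop over both values followed by a whole-string reversal with a fixed-width 6-digit base-40 extraction per value (most-significant digit first) followed by stripping leading zero digits; segments are concatenated in swapped order and no reversal is needed.
import Mathlib
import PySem

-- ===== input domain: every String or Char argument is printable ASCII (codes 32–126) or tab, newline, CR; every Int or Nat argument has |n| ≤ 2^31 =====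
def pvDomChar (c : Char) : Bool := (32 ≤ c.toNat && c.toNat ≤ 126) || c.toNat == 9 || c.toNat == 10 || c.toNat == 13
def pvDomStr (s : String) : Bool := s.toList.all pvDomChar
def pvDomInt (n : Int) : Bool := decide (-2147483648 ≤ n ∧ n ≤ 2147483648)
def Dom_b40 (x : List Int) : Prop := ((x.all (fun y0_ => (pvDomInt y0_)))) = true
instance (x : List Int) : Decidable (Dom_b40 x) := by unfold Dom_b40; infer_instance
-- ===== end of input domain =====

-- B replaces A's accumulating digit loop + whole-string reversal by a fixed-width
-- 6-digit base-40 extraction per value followed by stripping leading zero digits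
-- (segments in swapped order, no reversal); objective: alternative decomposition.
-- Strings are ported as List Char, packed with String.ofList at the end.

-- ===== PORT A =====
-- the digit alphabet c
def b40_c : List Char := "_0123456789ABCDEFGHIJKLMNOPQRSTUVWXYZ.?/".toList

-- the inner 'while i: t += c[i % 40]; i //= 40' loop (for i > 0; Pre_ excludes negative
-- values, on which the Python loop never terminates)
def b40_loop (i : Int) (t : List Char) : List Char :=
  if h : 0 < i then
    b40_loop (PySem.Int.floordiv i 40) (t ++ [b40_c.getD (PySem.Int.mod i 40).toNat '_'])
  else t
termination_by i.toNat
decreasing_by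
  rw [PySem.Int.floordiv_eq_ediv_of_pos (by omega)]
  omega

def b40 (x : List Int) : String :=
  -- for i in (x[1] >> 5, x[0]); out-of-range indices are excluded by Pre_ (getD 0 is never hit)
  String.ofList ('"' ::
    (b40_loop ((PySem.List.pyGet? x 0).getD 0)
      (b40_loop (PySem.Int.floordiv ((PySem.List.pyGet? x 1).getD 0) 32) [])).reverse ++ ['"'])

-- ===== PORT B =====
-- 'while digits and digits[0] == 0: digits = digits[1:]' — exact transliteration of
-- B's leading-zero-stripping while loop
def b40_strip : List Int → List Int
  | [] => []
  | d :: rest => if d == 0 then b40_strip rest else d :: rest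

-- conv(i): fixed-width digit list [i // 40**k % 40 for k in range(5, -1, -1)],
-- strip leading zeros, then map through the alphabet
def b40_conv (i : Int) : List Char :=
  (b40_strip ((PySem.List.pyRange 5 (-1) (-1)).map
      (fun k => PySem.Int.mod (PySem.Int.floordiv i ((40 : Int) ^ k.toNat)) 40))).map
    (fun d => b40_c.getD d.toNat '_')

def b40_alt (x : List Int) : String :=
  String.ofList ('"' :: (b40_conv ((PySem.List.pyGet? x 0).getD 0)
    ++ b40_conv (PySem.Int.floordiv ((PySem.List.pyGet? x 1).getD 0) 32)) ++ ['"'])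

-- ===== PRECONDITION & SPEC =====
-- Pre_ excludes lists shorter than 2 (A raises IndexError) and lists whose first or second
-- element is negative (A's 'while i' loop never terminates on a negative value).
def Pre_b40 (x : List Int) : Prop := 2 ≤ x.length ∧ 0 ≤ x.getD 0 0 ∧ 0 ≤ x.getD 1 0
instance (x : List Int) : Decidable (Pre_b40 x) := by unfold Pre_b40; infer_instance
def pvWitness_b40 : List Int := [1000, 4711]
def Spec_b40 (x : List Int) (out : String) : Prop := out = b40_alt x
instance (x : List Int) (out : String) : Decidable (Spec_b40 x out) := by unfold Spec_b40; infer_instance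

-- ===== CLAIM (what is proved, stated in full; the proofs are below) =====
def Claim_equal_b40 : Prop := ∀ (x : List Int), Dom_b40 x → Pre_b40 x → Spec_b40 x (b40 x)

-- ===== LEMMAS AND PROOFS =====

-- proof-side characterisation: the digit indices of i, most-significant first
def b40_recD (i : Int) : List Int :=
  if h : 0 < i then b40_recD (PySem.Int.floordiv i 40) ++ [PySem.Int.mod i 40]
  else []
termination_by i.toNat
decreasing_by
  rw [PySem.Int.floordiv_eq_ediv_of_pos (by omega)]
  omega

theorem b40_recD_pos (i : Int) (h : 0 < i) :
    b40_recD i = b40_recD (PySem.Int.floordiv i 40) ++ [PySem.Int.mod i 40] := by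
  rw [b40_recD, dif_pos h]

theorem b40_recD_nonpos (i : Int) (h : ¬ 0 < i) : b40_recD i = [] := by
  rw [b40_recD, dif_neg h]

theorem b40_recD_ne_nil (i : Int) (h : 0 < i) : b40_recD i ≠ [] := by
  rw [b40_recD_pos i h]; simp

-- A's loop appends the digits of i in least-significant-first order
theorem b40_loop_eq (i : Int) (t : List Char) :
    b40_loop i t = t ++ ((b40_recD i).map (fun d => b40_c.getD d.toNat '_')).reverse := by
  induction i, t using b40_loop.induct with
  | case1 i t h ih =>
    rw [b40_loop, dif_pos h, ih, b40_recD_pos i h]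
    simp
  | case2 i t h =>
    rw [b40_loop, dif_neg h, b40_recD_nonpos i h]
    simp

-- proof-side fixed-width digit list, most-significant first
def b40_fixD : Nat → Int → List Int
  | 0, _ => []
  | n + 1, i => b40_fixD n (PySem.Int.floordiv i 40) ++ [PySem.Int.mod i 40]

theorem b40_fixD_zero (m : Nat) : b40_fixD m 0 = List.replicate m 0 := by
  induction m with
  | zero => simp [b40_fixD]
  | succ m ihm =>
    rw [b40_fixD, PySem.Int.floordiv_eq_ediv_of_pos (by norm_num),
        PySem.Int.mod_eq_emod_of_pos (by norm_num)]
    simp [ihm, List.replicate_succ']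

theorem b40_strip_replicate (m : Nat) : b40_strip (List.replicate m (0 : Int)) = [] := by
  induction m with
  | zero => simp [b40_strip]
  | succ m ihm => simpa [b40_strip, List.replicate_succ] using ihm

-- B's comprehension produces exactly the 6-wide fixed digit list
theorem b40_map_eq_fixD (i : Int) :
    (PySem.List.pyRange 5 (-1) (-1)).map
      (fun k => PySem.Int.mod (PySem.Int.floordiv i ((40 : Int) ^ k.toNat)) 40) =
      b40_fixD 6 i := by
  have ed : ∀ b c : Int, 0 < b → 0 < c → i / b / c = i / (b * c) := by
    intro b c hb hc
    exact Int.ediv_ediv_of_nonneg (by omega)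
  have e1 : i / 40 / 40 = i / 1600 := by rw [ed 40 40 (by norm_num) (by norm_num)]; norm_num
  have e2 : i / 1600 / 40 = i / 64000 := by rw [ed 1600 40 (by norm_num) (by norm_num)]; norm_num
  have e3 : i / 64000 / 40 = i / 2560000 := by
    rw [ed 64000 40 (by norm_num) (by norm_num)]; norm_num
  have e4 : i / 2560000 / 40 = i / 102400000 := by
    rw [ed 2560000 40 (by norm_num) (by norm_num)]; norm_num
  have hr : PySem.List.pyRange 5 (-1) (-1) = [5, 4, 3, 2, 1, 0] := by decide
  rw [hr]
  simp only [List.map_cons, List.map_nil, b40_fixD]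
  norm_num [show Int.toNat 5 = 5 from rfl, show Int.toNat 4 = 4 from rfl,
    show Int.toNat 3 = 3 from rfl, show Int.toNat 2 = 2 from rfl, e1, e2, e3, e4]

-- stripping the leading zeros of the fixed-width list gives the recursive digit list
theorem b40_strip_append (l₁ l₂ : List Int) (h : b40_strip l₁ ≠ []) :
    b40_strip (l₁ ++ l₂) = b40_strip l₁ ++ l₂ := by
  induction l₁ with
  | nil => simp [b40_strip] at h
  | cons d rest ih =>
    by_cases hd : d = 0
    · subst hd
      simp only [List.cons_append] at h ⊢
      simp [b40_strip] at h ⊢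
      exact ih h
    · simp [b40_strip, hd]

theorem b40_strip_fixD (n : Nat) (i : Int) (h0 : 0 ≤ i) (hlt : i < 40 ^ n) :
    b40_strip (b40_fixD n i) = b40_recD i := by
  induction n generalizing i with
  | zero =>
    have : i = 0 := by simp at hlt; omega
    subst this
    simp [b40_fixD, b40_strip, b40_recD_nonpos 0 (by omega)]
  | succ n ih =>
    have hdq : PySem.Int.floordiv i 40 = i / 40 := PySem.Int.floordiv_eq_ediv_of_pos (by norm_num)
    have hmq : PySem.Int.mod i 40 = i % 40 := PySem.Int.mod_eq_emod_of_pos (by norm_num)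
    have hq0 : 0 ≤ i / 40 := by omega
    have hqlt : i / 40 < 40 ^ n := by
      have h40 : (40 : Int) ^ (n + 1) = 40 ^ n * 40 := by ring
      rw [Int.ediv_lt_iff_lt_mul (by norm_num)]
      omega
    have ihq := ih (i / 40) hq0 hqlt
    rw [b40_fixD, hdq, hmq]
    by_cases hi : 0 < i
    · rw [b40_recD_pos i hi, hdq, hmq]
      by_cases hq : 0 < i / 40
      · rw [b40_strip_append _ _ (by rw [ihq]; exact b40_recD_ne_nil _ hq), ihq]
      · have hq' : i / 40 = 0 := by omega
        have hm : i % 40 = i := by omega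
        rw [hq', b40_recD_nonpos 0 (by omega), b40_fixD_zero n]
        have hrep : ∀ m : Nat, b40_strip (List.replicate m (0 : Int) ++ [i % 40]) = [i % 40] := by
          intro m
          induction m with
          | zero => simp [b40_strip, hm, show i ≠ 0 by omega]
          | succ m ihm => simpa [b40_strip, List.replicate_succ] using ihm
        rw [hrep n]
        simp
    · have : i = 0 := by omega
      subst this
      rw [b40_recD_nonpos 0 (by omega)]
      have h04 : (0 : Int) / 40 = 0 := by norm_num
      have h0m : (0 : Int) % 40 = 0 := by norm_num
      rw [h04, h0m, b40_fixD_zero n, ← List.replicate_succ']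
      exact b40_strip_replicate (n + 1)

-- B's conv equals the mapped recursive digit list on 32-bit values
theorem b40_conv_eq (i : Int) (h0 : 0 ≤ i) (hlt : i ≤ 2147483648) :
    b40_conv i = (b40_recD i).map (fun d => b40_c.getD d.toNat '_') := by
  unfold b40_conv
  rw [b40_map_eq_fixD, b40_strip_fixD 6 i h0 (by norm_num; omega)]

-- ===== VERDICT (by name: the statement is the Claim_ definition above) =====
theorem b40_spec : Claim_equal_b40 := by
  intro x hdom hpre
  obtain ⟨hlen, h0, h1⟩ := hpre
  match x with
  | a :: b :: rest =>
    simp only [List.getD, List.getElem?_cons_zero, List.getElem?_cons_succ,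
      Option.getD_some] at h0 h1
    have hdom' : pvDomInt a = true ∧ pvDomInt b = true := by
      unfold Dom_b40 at hdom; simp [List.all_cons] at hdom; tauto
    have ha : a ≤ 2147483648 := by
      have := hdom'.1; unfold pvDomInt at this; simp at this; omega
    have hb : b ≤ 2147483648 := by
      have := hdom'.2; unfold pvDomInt at this; simp at this; omega
    have hget0 : (PySem.List.pyGet? (a :: b :: rest) 0).getD 0 = a := by
      simp [PySem.List.pyGet?, PySem.List.pyIdx?,
        show (0 : Int) ≤ (rest.length : Int) + 1 by positivity]
    have hget1 : (PySem.List.pyGet? (a :: b :: rest) 1).getD 0 = b := by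
      simp [PySem.List.pyGet?, PySem.List.pyIdx?]
    have hdb : PySem.Int.floordiv b 32 = b / 32 := PySem.Int.floordiv_eq_ediv_of_pos (by norm_num)
    unfold Spec_b40 b40 b40_alt
    rw [hget0, hget1, b40_loop_eq, b40_loop_eq,
        b40_conv_eq a h0 ha, b40_conv_eq _ (by rw [hdb]; omega) (by rw [hdb]; omega)]
    simp
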